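-- pv_equiv track=rewrite | github.com/euctrl-pru/rt-python | pru/AltitudeProfile.py | find_level_sections
-- ===== SOURCE A (Python) =====
-- def find_level_sections(alts):
--     """
--     Find pairs of start/finish indicies of consecutive altitudes with the same
--     value. I.e. where an aircraft was in level flight.
--
--     Parameters
--     ----------
--     alts: float array
--         An array of altitudes[feet]
--
--     Returns
--     -------
--     level_indicies: a list of indicies of the starts and finishes of
--     level sections.
--     """
--     # Get the indicies of positions at the starts and end of levels
--     level_indicies = []
--
--     if len(alts) > 2:
--         prev_alt = alts[0]
--         alt = alts[1]
--
--         # If the first two altitudea are the same, mark as is_level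
--         is_level = (prev_alt == alt)
--         if is_level:
--             level_indicies.append(0)
--
--         for index in range(1, len(alts) - 1):
--             next_alt = alts[index + 1]
--             if is_level:
--                 # ignore single values at a different altitude
--                 is_level = (alt == next_alt)
--                 if not is_level:  # no longer is_level
--                     # note the end cruise index
--                     level_indicies.append(index)
--             else:  # was not is_level
--                 is_level = (alt == next_alt)
--                 if is_level:
--                     # note the start cruise index
--                     level_indicies.append(index)
--
--             # advance altitudes
--             alt = next_alt
--             prev_alt = alt
--
--         # Ensure end is recorded if is_level
--         if is_level:
--             level_indicies.append(len(alts) - 1)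
--
--     return level_indicies
-- ===== SOURCE B (Python) =====
-- from itertools import groupby
--
--
-- def find_level_sections(alts):
--     """Run-length (groupby) reimplementation: each maximal run of >= 2 equal
--     consecutive altitudes contributes its start and end index."""
--     if len(alts) <= 2:
--         return []
--     level_indicies = []
--     i = 0
--     for _, group in groupby(alts):
--         n = sum(1 for _ in group)
--         if n >= 2:
--             level_indicies.append(i)
--             level_indicies.append(i + n - 1)
--         i += n
--     return level_indicies
-- ===== Notes on version B (the rewrite author's own statement) =====
-- stated objective: idiomatic
-- what changed: Replaced the index-based is_level state machine with itertools.groupby over maximal runs of equal consecutive altitudes, emitting start and end index of every run of length >= 2.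
import Mathlib
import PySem

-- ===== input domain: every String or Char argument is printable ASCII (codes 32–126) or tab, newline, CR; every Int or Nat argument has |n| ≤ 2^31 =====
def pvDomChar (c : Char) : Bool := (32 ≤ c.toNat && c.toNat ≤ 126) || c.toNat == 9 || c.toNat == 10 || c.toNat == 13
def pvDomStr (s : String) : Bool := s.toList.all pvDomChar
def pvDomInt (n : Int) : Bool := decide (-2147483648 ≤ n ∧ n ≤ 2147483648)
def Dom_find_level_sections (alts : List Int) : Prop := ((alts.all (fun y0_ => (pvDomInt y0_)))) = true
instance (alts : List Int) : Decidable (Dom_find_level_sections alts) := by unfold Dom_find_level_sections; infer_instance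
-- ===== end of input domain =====

-- B replaces A's is_level state machine by a groupby-style run-length scan (objective: idiomatic).

-- ===== PORT A =====
-- loop body of A's `for index in range(1, len(alts) - 1)`; state = (alt, is_level, level_indicies).
-- pyGetD's default 0 is never used: inside the guard every accessed index is in range.
def stepA (alts : List Int) (st : Int × Bool × List Int) (index : Int) : Int × Bool × List Int :=
  let alt := st.1
  let is_level := st.2.1
  let acc := st.2.2
  let next_alt := PySem.List.pyGetD alts (index + 1) 0
  if is_level then
    if !(alt == next_alt) then (next_alt, false, acc ++ [index])
    else (next_alt, true, acc)
  else
    if alt == next_alt then (next_alt, true, acc ++ [index])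
    else (next_alt, false, acc)

def find_level_sections (alts : List Int) : List Int :=
  if 2 < (alts.length : Int) then
    let prev_alt := PySem.List.pyGetD alts 0 0
    let alt := PySem.List.pyGetD alts 1 0
    let is_level := prev_alt == alt
    let level_indicies : List Int := if is_level then [0] else []
    let st := (PySem.List.pyRange 1 ((alts.length : Int) - 1) 1).foldl (stepA alts)
      (alt, is_level, level_indicies)
    if st.2.1 then st.2.2 ++ [(alts.length : Int) - 1] else st.2.2
  else []

-- ===== PORT B =====
-- groupby over alts: each (value, group) is the maximal run `a :: rest.takeWhile (== a)`;
-- i is the running start-index counter.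
def altAux (i : Int) : List Int → List Int
  | [] => []
  | a :: rest =>
      let n : Int := 1 + ((rest.takeWhile (fun x => x == a)).length : Int)
      (if 2 ≤ n then [i, i + n - 1] else []) ++ altAux (i + n) (rest.dropWhile (fun x => x == a))
termination_by l => l.length
decreasing_by
  simp only [List.length_cons]
  exact Nat.lt_succ_of_le (List.length_dropWhile_le _ _)

def find_level_sections_alt (alts : List Int) : List Int :=
  if (alts.length : Int) ≤ 2 then [] else altAux 0 alts

-- ===== PRECONDITION & SPEC =====
def Spec_find_level_sections (alts : List Int) (out : List Int) : Prop := out = find_level_sections_alt alts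
instance (alts : List Int) (out : List Int) : Decidable (Spec_find_level_sections alts out) := by unfold Spec_find_level_sections; infer_instance

-- ===== CLAIM (what is proved, stated in full; the proofs are below) =====
def Claim_equal_find_level_sections : Prop := ∀ (alts : List Int), Dom_find_level_sections alts → Spec_find_level_sections alts (find_level_sections alts)

-- ===== LEMMAS AND PROOFS =====

-- unfolding equations for altAux (defined by well-founded recursion)
theorem altAux_nil (i : Int) : altAux i [] = [] := by
  simp [altAux]

theorem altAux_cons (i a : Int) (rest : List Int) :
    altAux i (a :: rest) =
      (if 2 ≤ 1 + ((rest.takeWhile (fun x => x == a)).length : Int) then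
        [i, i + (1 + ((rest.takeWhile (fun x => x == a)).length : Int)) - 1] else []) ++
      altAux (i + (1 + ((rest.takeWhile (fun x => x == a)).length : Int)))
        (rest.dropWhile (fun x => x == a)) := by
  rw [altAux]

-- A's loop, rephrased as structural recursion on the suffix of altitudes still to read:
-- emit the current index exactly when is_level flips; finally emit the last index if level.
def loopA : Int → Bool → Int → List Int → List Int
  | _, lvl, i, [] => if lvl then [i] else []
  | alt, lvl, i, next :: rest =>
      (if lvl != (alt == next) then [i] else []) ++ loopA next (alt == next) (i + 1) rest


theorem key (rest : List Int) : ∀ (alt i : Int),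
    loopA alt false i rest = altAux i (alt :: rest) ∧
    loopA alt true i rest =
      (i + ((rest.takeWhile (fun x => x == alt)).length : Int)) ::
        altAux (i + ((rest.takeWhile (fun x => x == alt)).length : Int) + 1)
          (rest.dropWhile (fun x => x == alt)) := by
  induction rest with
  | nil =>
      intro alt i
      refine ⟨?_, ?_⟩
      · simp only [altAux_cons]
        simp [loopA, altAux_nil]
      · simp [loopA, altAux_nil]
  | cons x rest' ih =>
      intro alt i
      by_cases hax : alt = x
      · subst hax
        refine ⟨?_, ?_⟩
        · rw [show loopA alt false i (alt :: rest') =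
              [i] ++ loopA alt true (i + 1) rest' by simp [loopA]]
          rw [(ih alt (i + 1)).2]
          simp only [altAux_cons]
          simp
          split_ifs with h2
          · simp only [List.cons_append, List.nil_append, List.cons.injEq]
            refine ⟨trivial, by omega, by congr 1; omega⟩
          · exact absurd (by omega) h2
        · rw [show loopA alt true i (alt :: rest') =
              [] ++ loopA alt true (i + 1) rest' by simp [loopA]]
          rw [(ih alt (i + 1)).2]
          simp
          refine ⟨by omega, by congr 1; omega⟩
      · have hbx : (alt == x) = false := by simp [hax]
        have hxb : (x == alt) = false := by simp [Ne.symm hax]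
        refine ⟨?_, ?_⟩
        · rw [show loopA alt false i (x :: rest') =
              [] ++ loopA x false (i + 1) rest' by simp [loopA, hbx]]
          rw [(ih x (i + 1)).1]
          simp only [altAux_cons]
          simp [hxb]
          rw [altAux_cons]
        · rw [show loopA alt true i (x :: rest') =
              [i] ++ loopA x false (i + 1) rest' by simp [loopA, hbx]]
          rw [(ih x (i + 1)).1]
          simp only [altAux_cons]
          simp [hxb]
          rw [altAux_cons]

theorem bridge (alts : List Int) : ∀ (rest : List Int) (j : Nat) (alt : Int) (lvl : Bool) (acc : List Int),
    alts.drop (j + 1) = rest → j + 1 + rest.length = alts.length →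
    (let st := (PySem.List.pyRange (j : Int) ((alts.length : Int) - 1) 1).foldl (stepA alts) (alt, lvl, acc)
     if st.2.1 then st.2.2 ++ [(alts.length : Int) - 1] else st.2.2)
    = acc ++ loopA alt lvl (j : Int) rest := by
  intro rest
  induction rest with
  | nil =>
      intro j alt lvl acc hdrop hlen
      have hj : (alts.length : Int) - 1 = (j : Int) := by
        simp at hlen; omega
      rw [PySem.List.pyRange_one_eq_nil (by omega)]
      cases lvl <;> simp [loopA, hj]
  | cons x rest' ih =>
      intro j alt lvl acc hdrop hlen
      have hlt : (j : Int) < (alts.length : Int) - 1 := by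
        simp at hlen; omega
      rw [PySem.List.pyRange_one_cons hlt]
      have hget : PySem.List.pyGetD alts ((j : Int) + 1) 0 = x := by
        have h0 : (alts.drop (j + 1))[0]? = some x := by rw [hdrop]; rfl
        have h1 : alts[j + 1]? = some x := by
          simpa [List.getElem?_drop] using h0
        have h2 : PySem.List.pyGetD alts ((j + 1 : Nat) : Int) 0 = x := by
          rw [PySem.List.pyGetD_natCast, List.getD, h1]
          rfl
        simpa using h2
      have hdrop' : alts.drop (j + 1 + 1) = rest' := by
        have h2 : alts.drop (j + 1 + 1) = (alts.drop (j + 1)).drop 1 := by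
          rw [List.drop_drop]
        rw [h2, hdrop]
        rfl
      have hlen' : (j + 1) + 1 + rest'.length = alts.length := by
        simp at hlen ⊢; omega
      have hstep : stepA alts (alt, lvl, acc) (j : Int) =
          (x, (alt == x), acc ++ (if lvl != (alt == x) then [(j : Int)] else [])) := by
        cases lvl <;> cases hb : (alt == x) <;>
          simp [stepA, hget, hb]
      rw [List.foldl_cons, hstep]
      have h3 := ih (j + 1) x (alt == x) (acc ++ (if lvl != (alt == x) then [(j : Int)] else [])) hdrop' hlen'
      push_cast at h3
      simp only at h3 ⊢
      rw [h3]
      simp [loopA]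

theorem find_level_sections_eq (alts : List Int) :
    find_level_sections alts = find_level_sections_alt alts := by
  match alts with
  | [] => rfl
  | [a] => rfl
  | [a, b] => rfl
  | a :: b :: c :: rest2 =>
    have h : 2 < ((a :: b :: c :: rest2).length : Int) := by simp; omega
    have hlen : 1 + 1 + (c :: rest2).length = (a :: b :: c :: rest2).length := by simp; omega
    have hb := bridge (a :: b :: c :: rest2) (c :: rest2) 1 b (a == b)
      (if (a == b) then [0] else []) rfl hlen
    simp only at hb
    unfold find_level_sections
    rw [if_pos h]
    have hg0 : PySem.List.pyGetD (a :: b :: c :: rest2) 0 0 = a :=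
      PySem.List.pyGetD_zero_cons _ _ _
    have hg1 : PySem.List.pyGetD (a :: b :: c :: rest2) 1 0 = b := by
      have h2 : PySem.List.pyGetD (a :: b :: c :: rest2) ((1 : Nat) : Int) 0 = b := by
        rw [PySem.List.pyGetD_natCast]
        rfl
      simpa using h2
    simp only [hg0, hg1]
    rw [Nat.cast_one] at hb
    rw [hb]
    rw [show find_level_sections_alt (a :: b :: c :: rest2) = altAux 0 (a :: b :: c :: rest2) by
      rw [find_level_sections_alt, if_neg (by simp)]]
    rw [altAux_cons]
    by_cases hab : a = b
    · subst hab
      rw [show (a == a) = true by simp]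
      rw [(key (c :: rest2) a 1).2]
      simp
      split_ifs with h2
      · simp only [List.cons_append, List.nil_append, List.cons.injEq]
        refine ⟨trivial, by omega, by congr 1⟩
      · exact absurd (by omega) h2
    · have hba : (b == a) = false := by simp [Ne.symm hab]
      rw [show (a == b) = false by simp [hab]]
      rw [(key (c :: rest2) b 1).1]
      simp only [altAux_cons]
      simp [hba]
      rw [altAux_cons]
      norm_num

-- ===== VERDICT (by name: the statement is the Claim_ definition above) =====
theorem find_level_sections_spec : Claim_equal_find_level_sections := by
  intro alts _
  unfold Spec_find_level_sections
  exact find_level_sections_eq alts
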